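-- pv_equiv track=rewrite | github.com/YxmMyth/full-self-crawl-agent-beta | src/agent/tools/browser_eval.py | _wrap_script
-- ===== SOURCE A (Python) =====
-- def _wrap_script(script: str) -> str:
--     """Auto-add return to last expression if user didn't write one.
--
--     - Has explicit 'return' → use as-is (user knows what they're doing)
--     - Single expression → return (expr)
--     - Multi-statement, no return → add return before last line
--     """
--     stripped = script.strip().rstrip(";")
--     if "return " in script or "return;" in script:
--         return script
--
--     lines = stripped.split("\n")
--     # Filter out empty/comment-only lines from the end
--     meaningful_lines = [l for l in lines if l.strip() and not l.strip().startswith("//")]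
--
--     if not meaningful_lines:
--         return script
--
--     if len(meaningful_lines) == 1:
--         # Single expression — wrap with return
--         return f"return ({stripped})"
--
--     # Multi-statement: add return before last meaningful line
--     last_line = meaningful_lines[-1].strip().rstrip(";")
--     # Find and replace the last meaningful line in the original
--     result_lines = list(lines)
--     for i in range(len(result_lines) - 1, -1, -1):
--         if result_lines[i].strip() == meaningful_lines[-1].strip():
--             indent = len(result_lines[i]) - len(result_lines[i].lstrip())
--             result_lines[i] = " " * indent + f"return ({last_line})"
--             break
--
--     return "\n".join(result_lines)
-- ===== SOURCE B (Python) =====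
-- def _wrap_script(script: str) -> str:
--     stripped = script.strip().rstrip(";")
--     if "return " in script or "return;" in script:
--         return script
--
--     lines = stripped.split("\n")
--     # One forward pass: meaningful lines recorded with their original index
--     meaningful = [(i, l) for i, l in enumerate(lines)
--                   if l.strip() and not l.strip().startswith("//")]
--
--     if not meaningful:
--         return script
--
--     if len(meaningful) == 1:
--         return f"return ({stripped})"
--
--     # Rewrite the recorded last meaningful line directly by index (no backward rescan)
--     idx, line = meaningful[-1]
--     indent = len(line) - len(line.lstrip())
--     body = line.strip().rstrip(";")
--     return "\n".join(lines[:idx] + [" " * indent + f"return ({body})"] + lines[idx + 1:])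
-- ===== Notes on version B (the rewrite author's own statement) =====
-- stated objective: simpler
-- what changed: B records the original index of each meaningful line in one forward enumerate pass and rewrites the last meaningful line directly by that index with list slicing, replacing A's copy-then-backward-rescan that re-matches the line by stripped-string equality.
import Mathlib
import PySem

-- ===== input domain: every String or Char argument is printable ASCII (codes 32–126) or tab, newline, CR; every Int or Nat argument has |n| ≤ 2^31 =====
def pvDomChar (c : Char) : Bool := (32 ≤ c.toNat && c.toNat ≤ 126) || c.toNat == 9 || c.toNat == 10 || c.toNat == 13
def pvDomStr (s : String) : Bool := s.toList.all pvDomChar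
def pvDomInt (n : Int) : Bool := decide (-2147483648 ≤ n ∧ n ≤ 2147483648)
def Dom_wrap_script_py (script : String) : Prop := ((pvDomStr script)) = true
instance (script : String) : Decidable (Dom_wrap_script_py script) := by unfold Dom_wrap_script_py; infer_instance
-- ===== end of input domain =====

-- B rewrites the last meaningful line directly at its recorded index (one forward
-- enumerate pass + slicing) instead of A's copy-then-backward-rescan by stripped equality.

-- ===== PORT A =====
-- Python str.rstrip(";") (right-side only; exact: drops trailing ';' characters)
def pvRstripSemi (s : String) : String :=
  String.ofList ((s.toList.reverse.dropWhile (fun c => c == ';')).reverse)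

-- the filter condition `l.strip() and not l.strip().startswith("//")`
def pvMeaningful (l : String) : Bool :=
  !(PySem.Str.strip l == "") && !(PySem.Str.startswith (PySem.Str.strip l) "//")

-- the replacement line `" " * indent + f"return ({last_line})"` built from matched line x
def pvReplLine (x b : String) : String :=
  String.ofList (List.replicate (PySem.Str.len x - PySem.Str.len (PySem.Str.lstrip x)).toNat ' ')
    ++ "return (" ++ b ++ ")"

-- A's `for i in range(len(result_lines)-1, -1, -1): … break`: processing the tail first
-- IS the scan from the end; the Bool is the "already replaced (break hit)" flag.
def pvGoA (tgt b : String) : List String → List String × Bool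
  | [] => ([], false)
  | x :: xs =>
    let r := pvGoA tgt b xs
    if r.2 then (x :: r.1, true)
    else if PySem.Str.strip x == tgt then (pvReplLine x b :: r.1, true)
    else (x :: r.1, false)

def wrap_script_py (script : String) : String :=
  let stripped := pvRstripSemi (PySem.Str.strip script)
  if PySem.Str.isIn "return " script || PySem.Str.isIn "return;" script then script
  else
    let lines := (PySem.Str.split? stripped "\n").getD []  -- sep "\n" ≠ "" so always some
    let meaningful := lines.filter pvMeaningful
    if meaningful = [] then script
    else if meaningful.length = 1 then "return (" ++ stripped ++ ")"
    else
      let tgt := PySem.Str.strip (meaningful.getLastD "")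
      let lastLine := pvRstripSemi tgt
      PySem.Str.join "\n" (pvGoA tgt lastLine lines).1

-- ===== PORT B =====
def wrap_script_py_alt (script : String) : String :=
  let stripped := pvRstripSemi (PySem.Str.strip script)
  if PySem.Str.isIn "return " script || PySem.Str.isIn "return;" script then script
  else
    let lines := (PySem.Str.split? stripped "\n").getD []
    let meaningful := (PySem.List.enumerate lines).filter (fun p => pvMeaningful p.2)
    match meaningful.getLast? with
    | none => script
    | some (idx, line) =>
      if meaningful.length = 1 then "return (" ++ stripped ++ ")"
      else
        -- lines[:idx] / lines[idx+1:] with idx ≥ 0 (it comes from enumerate) = take / drop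
        PySem.Str.join "\n"
          (lines.take idx.toNat ++ [pvReplLine line (pvRstripSemi (PySem.Str.strip line))]
            ++ lines.drop (idx.toNat + 1))

-- ===== PRECONDITION & SPEC =====
def Spec_wrap_script_py (script : String) (out : String) : Prop := out = wrap_script_py_alt script
instance (script : String) (out : String) : Decidable (Spec_wrap_script_py script out) := by unfold Spec_wrap_script_py; infer_instance

-- ===== CLAIM (what is proved, stated in full; the proofs are below) =====
def Claim_equal_wrap_script_py : Prop := ∀ (script : String), Dom_wrap_script_py script → Spec_wrap_script_py script (wrap_script_py script)

-- ===== LEMMAS AND PROOFS =====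

-- the filtered enumerate projects to the plain filtered list
theorem pv_map_snd_filter_enum (xs : List String) (s : Int) :
    (((PySem.List.enumerate xs s).filter (fun p => pvMeaningful p.2)).map (·.2))
      = xs.filter pvMeaningful := by
  induction xs generalizing s with
  | nil => simp [PySem.List.enumerate_nil]
  | cons x xs ih =>
    rw [PySem.List.enumerate_cons]
    by_cases h : pvMeaningful x
    · simp [h, ih]
    · simp [h, ih]

theorem pv_getLast?_cons {α : Type} (l : List α) (a : α) (h : l ≠ []) :
    (a :: l).getLast? = l.getLast? := by
  cases l with
  | nil => exact absurd rfl h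
  | cons b t => simp [List.getLast?_cons_cons]

-- characterisation of the last element of the filtered enumerate
theorem pv_getLast_filter_enum (xs : List String) (s : Int) (idx : Int) (line : String)
    (h : ((PySem.List.enumerate xs s).filter (fun p => pvMeaningful p.2)).getLast? = some (idx, line)) :
    ∃ k : Nat, ∃ hk : k < xs.length, idx = s + k ∧ xs[k] = line ∧ pvMeaningful line = true ∧
      ∀ j, k < j → (hj : j < xs.length) → pvMeaningful xs[j] = false := by
  induction xs generalizing s with
  | nil => simp [PySem.List.enumerate_nil] at h
  | cons x xs ih =>
    rw [PySem.List.enumerate_cons] at h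
    rcases htail : ((PySem.List.enumerate xs (s+1)).filter (fun p => pvMeaningful p.2)).getLast? with _ | ⟨i', l'⟩
    · -- tail filter is empty; the last element must be the head
      have hnil : ((PySem.List.enumerate xs (s+1)).filter (fun p => pvMeaningful p.2)) = [] :=
        List.getLast?_eq_none_iff.mp htail
      have hall : ∀ j, (hj : j < xs.length) → pvMeaningful xs[j] = false := by
        intro j hj
        by_contra hc
        have hmem : ((s+1) + (j:Int), xs[j]) ∈ (PySem.List.enumerate xs (s+1)).filter (fun p => pvMeaningful p.2) := by
          apply List.mem_filter.mpr
          constructor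
          · exact (PySem.List.mem_enumerate_iff _ _ _).mpr ⟨j, hj, rfl⟩
          · simpa using hc
        rw [hnil] at hmem; simp at hmem
      by_cases hx : pvMeaningful x
      · rw [List.filter_cons_of_pos (by simpa using hx), hnil] at h
        simp at h
        refine ⟨0, by simp, by simpa using h.1.symm, by simpa using h.2, ?_, ?_⟩
        · rw [← h.2]; exact hx
        · intro j hj hjl
          cases j with
          | zero => omega
          | succ j => exact hall j (by simpa using hjl)
      · rw [List.filter_cons_of_neg (by simpa using hx), hnil] at h
        simp at h
    · -- the last element comes from the tail
      have h' : ((PySem.List.enumerate xs (s+1)).filter (fun p => pvMeaningful p.2)).getLast? = some (idx, line) := by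
        by_cases hx : pvMeaningful x
        · rw [List.filter_cons_of_pos (by simpa using hx)] at h
          rwa [pv_getLast?_cons _ _ (by intro hn; rw [hn] at htail; simp at htail)] at h
        · rwa [List.filter_cons_of_neg (by simpa using hx)] at h
      obtain ⟨k, hk, hidx, hget, hm, hafter⟩ := ih (s+1) h'
      refine ⟨k+1, by simpa using Nat.succ_lt_succ hk, by push_cast; omega, by simpa using hget, hm, ?_⟩
      intro j hj hjl
      cases j with
      | zero => omega
      | succ j => exact hafter j (by omega) (by simpa using hjl)

-- no line whose strip differs from tgt is touched by the scan
theorem pv_goA_nomatch (tgt b : String) (xs : List String)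
    (h : ∀ y ∈ xs, (PySem.Str.strip y == tgt) = false) :
    pvGoA tgt b xs = (xs, false) := by
  induction xs with
  | nil => rfl
  | cons x xs ih =>
    have hx := h x (by simp)
    have ht : pvGoA tgt b xs = (xs, false) := ih (fun y hy => h y (by simp [hy]))
    simp [pvGoA, ht, hx]

-- pvMeaningful depends only on the stripped line
theorem pv_meaningful_of_strip_eq {y l : String}
    (h : PySem.Str.strip y = PySem.Str.strip l) : pvMeaningful y = pvMeaningful l := by
  simp [pvMeaningful, h]

-- the backward scan replaces exactly the last meaningful line
theorem pv_goA_spec (b : String) (xs : List String) (k : Nat) (hk : k < xs.length)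
    (hm : pvMeaningful xs[k] = true)
    (hafter : ∀ j, k < j → (hj : j < xs.length) → pvMeaningful xs[j] = false) :
    pvGoA (PySem.Str.strip xs[k]) b xs
      = (xs.take k ++ [pvReplLine xs[k] b] ++ xs.drop (k+1), true) := by
  induction xs generalizing k with
  | nil => simp at hk
  | cons x xs ih =>
    cases k with
    | zero =>
      simp only [List.getElem_cons_zero] at hm ⊢
      have hnom : pvGoA (PySem.Str.strip x) b xs = (xs, false) := by
        apply pv_goA_nomatch
        intro y hy
        obtain ⟨j, hj, rfl⟩ := List.getElem_of_mem hy
        have hf : pvMeaningful xs[j] = false := by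
          have := hafter (j+1) (by omega) (by simpa using Nat.succ_lt_succ hj)
          simpa using this
        by_contra hc
        have hse : PySem.Str.strip xs[j] = PySem.Str.strip x := by
          simpa using (beq_iff_eq).mp (by simpa using hc)
        have heq : pvMeaningful xs[j] = pvMeaningful x := pv_meaningful_of_strip_eq hse
        rw [heq, hm] at hf
        simp at hf
      simp [pvGoA, hnom]
    | succ k =>
      have hk' : k < xs.length := by simpa using hk
      have hm' : pvMeaningful xs[k] = true := by simpa using hm
      have hafter' : ∀ j, k < j → (hj : j < xs.length) → pvMeaningful xs[j] = false := by
        intro j hj hjl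
        have := hafter (j+1) (by omega) (by simpa using Nat.succ_lt_succ hjl)
        simpa using this
      have := ih k hk' hm' hafter'
      simp only [List.getElem_cons_succ] at *
      simp [pvGoA, this]

-- ===== VERDICT (by name: the statement is the Claim_ definition above) =====
theorem wrap_script_py_spec : Claim_equal_wrap_script_py := by
  intro script _
  unfold Spec_wrap_script_py wrap_script_py wrap_script_py_alt
  by_cases hret : (PySem.Str.isIn "return " script || PySem.Str.isIn "return;" script) = true
  · rw [if_pos hret, if_pos hret]
  · rw [if_neg hret, if_neg hret]
    set stripped := pvRstripSemi (PySem.Str.strip script) with hs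
    set lines := (PySem.Str.split? stripped "\n").getD [] with hl
    have hmap := pv_map_snd_filter_enum lines 0
    rcases hlast : ((PySem.List.enumerate lines 0).filter (fun p => pvMeaningful p.2)).getLast? with _ | ⟨idx, line⟩
    · have hnil : ((PySem.List.enumerate lines 0).filter (fun p => pvMeaningful p.2)) = [] :=
        List.getLast?_eq_none_iff.mp hlast
      have hfil : lines.filter pvMeaningful = [] := by rw [← hmap, hnil]; rfl
      simp only [hlast]
      rw [if_pos hfil]
    · obtain ⟨k, hk, hidx, hget, hm, hafter⟩ := pv_getLast_filter_enum lines 0 idx line hlast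
      have hlen : (lines.filter pvMeaningful).length
          = ((PySem.List.enumerate lines 0).filter (fun p => pvMeaningful p.2)).length := by
        rw [← hmap, List.length_map]
      have hAlast : (lines.filter pvMeaningful).getLast? = some line := by
        rw [← hmap, List.getLast?_map, hlast]; rfl
      have hne : lines.filter pvMeaningful ≠ [] := by
        intro hn; rw [hn] at hAlast; simp at hAlast
      simp only [hlast]
      rw [if_neg hne]
      by_cases h1 : ((PySem.List.enumerate lines 0).filter (fun p => pvMeaningful p.2)).length = 1
      · rw [if_pos (by rw [hlen]; exact h1), if_pos h1]
      · rw [if_neg (by rw [hlen]; exact h1), if_neg h1]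
        have hgetD : (lines.filter pvMeaningful).getLastD "" = line := by
          rw [List.getLastD_eq_getLast?, hAlast]; rfl
        have hidxk : idx.toNat = k := by omega
        rw [hgetD, hidxk, ← hget,
          pv_goA_spec (pvRstripSemi (PySem.Str.strip lines[k])) lines k hk (by rw [hget]; exact hm) hafter]
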